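-- pv_equiv track=rewrite | github.com/yagorezende/ESIIChess | logic/tools.py | count_material_advantage
-- ===== SOURCE A (Python) =====
-- def count_material_advantage(board_matrix, color) -> int:
--     advantage = 0
--     for row in board_matrix:
--         for code in row:
--             if code and code[1] != 'k':
--                 factor = 1 if code[0] == color else -1
--                 if code[1] == 'p': # 1 for pawns
--                     advantage += factor
--                 elif code[1] == 'r': # 5 for rooks
--                     advantage += factor * 5
--                 elif code[1] == 'q': # 9 for queens
--                     advantage += factor * 9
--                 else: # 3 for knights and bishops
--                     advantage += factor * 3
--     return advantage
-- ===== SOURCE B (Python) =====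
-- def count_material_advantage(board_matrix, color) -> int:
--     # tally codes once (skip falsy codes and kings), then weight each distinct code
--     pieces = [code for row in board_matrix for code in row if code and code[1] != 'k']
--     counts = {}
--     for code in pieces:
--         counts[code] = counts.get(code, 0) + 1
--     total = 0
--     for code, n in counts.items():
--         value = {'p': 1, 'r': 5, 'q': 9}.get(code[1], 3)
--         factor = 1 if code[0] == color else -1
--         total += value * factor * n
--     return total
-- ===== Notes on version B (the rewrite author's own statement) =====
-- stated objective: alternative
-- what changed: B flattens the board into one filtered list of surviving piece codes, tallies them into a dict of per-code counts, and then weights each distinct code once (value * sign * count), instead of A's per-cell classify-and-accumulate over the nested loops.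
import Mathlib
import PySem

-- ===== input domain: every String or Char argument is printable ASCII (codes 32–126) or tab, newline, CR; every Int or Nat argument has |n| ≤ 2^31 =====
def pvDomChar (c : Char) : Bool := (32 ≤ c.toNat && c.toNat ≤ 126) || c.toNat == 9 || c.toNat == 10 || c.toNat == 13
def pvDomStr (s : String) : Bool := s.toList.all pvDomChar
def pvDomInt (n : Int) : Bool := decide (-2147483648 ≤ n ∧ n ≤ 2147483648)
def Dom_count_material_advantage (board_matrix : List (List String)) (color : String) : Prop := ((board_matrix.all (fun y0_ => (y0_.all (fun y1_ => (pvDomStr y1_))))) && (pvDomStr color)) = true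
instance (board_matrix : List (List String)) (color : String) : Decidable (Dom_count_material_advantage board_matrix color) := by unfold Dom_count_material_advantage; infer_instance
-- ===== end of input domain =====

-- B tallies the surviving piece codes into a dict in one pass and weights each distinct code once (alternative decomposition; same value).


-- ===== PORT A =====
-- one step of A's inner loop: 'if code and code[1] != 'k': …'; match on the chars of
-- code ('' falsy → skip; a 1-char code raises IndexError in Python and is excluded by Pre_)
def cmaStep (color : List Char) (acc : Int) (code : List Char) : Int :=
  match code with
  | c0 :: c1 :: _ =>
      if c1 ≠ 'k' then
        let factor : Int := if [c0] = color then 1 else -1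
        if c1 = 'p' then acc + factor
        else if c1 = 'r' then acc + factor * 5
        else if c1 = 'q' then acc + factor * 9
        else acc + factor * 3
      else acc
  | _ => acc

def count_material_advantage (board_matrix : List (List String)) (color : String) : Int :=
  board_matrix.foldl
    (fun advantage row => row.foldl (fun a code => cmaStep color.toList a code.toList) advantage) 0

-- ===== PORT B =====
-- 'code and code[1] != 'k'' of B's comprehension (1-char codes raise in Python, excluded by Pre_)
def cmaKeep (code : String) : Bool :=
  match code.toList with
  | _ :: c1 :: _ => c1 ≠ 'k'
  | _ => false

-- value * factor * n for one dict item (code, n); {'p':1,'r':5,'q':9}.get(code[1], 3)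
def cmaItem (color : List Char) (total : Int) (p : String × Int) : Int :=
  match p.1.toList with
  | c0 :: c1 :: _ =>
      (let value : Int := if c1 = 'p' then 1 else if c1 = 'r' then 5 else if c1 = 'q' then 9 else 3
       let factor : Int := if [c0] = color then 1 else -1
       total + value * factor * p.2)
  | _ => total

def count_material_advantage_alt (board_matrix : List (List String)) (color : String) : Int :=
  let pieces := (board_matrix.flatMap id).filter cmaKeep
  let counts := pieces.foldl (fun d code => d.insert code (d.getD code 0 + 1)) PySem.Dict.empty
  counts.items.foldl (fun total p => cmaItem color.toList total p) 0

-- ===== PRECONDITION & SPEC =====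
-- Pre_ excludes exactly the boards containing a 1-character code: there Python's code[1] raises IndexError.
def Pre_count_material_advantage (board_matrix : List (List String)) (color : String) : Prop :=
  (board_matrix.all (fun row => row.all (fun code => code.toList.length != 1))) = true
instance (board_matrix : List (List String)) (color : String) : Decidable (Pre_count_material_advantage board_matrix color) := by unfold Pre_count_material_advantage; infer_instance
def pvWitness_count_material_advantage : List (List String) × String :=
  ([["wp", "bq", ""], ["bn", "wr", "bk"]], "w")

def Spec_count_material_advantage (board_matrix : List (List String)) (color : String) (out : Int) : Prop := out = count_material_advantage_alt board_matrix color
instance (board_matrix : List (List String)) (color : String) (out : Int) : Decidable (Spec_count_material_advantage board_matrix color out) := by unfold Spec_count_material_advantage; infer_instance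

-- ===== CLAIM (what is proved, stated in full; the proofs are below) =====
def Claim_equal_count_material_advantage : Prop := ∀ (board_matrix : List (List String)) (color : String), Dom_count_material_advantage board_matrix color → Pre_count_material_advantage board_matrix color → Spec_count_material_advantage board_matrix color (count_material_advantage board_matrix color)

-- ===== LEMMAS AND PROOFS =====

-- the weight one surviving code contributes (A per occurrence, B per item via the count)
def cmaWeight (color : List Char) (code : String) : Int :=
  match code.toList with
  | c0 :: c1 :: _ =>
      (if c1 = 'p' then 1 else if c1 = 'r' then 5 else if c1 = 'q' then 9 else 3) *
      (if [c0] = color then 1 else -1)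
  | _ => 0

lemma cmaStep_eq (color : List Char) (acc : Int) (code : String)
    (h : code.toList.length ≠ 1) :
    cmaStep color acc code.toList =
      acc + (if cmaKeep code then cmaWeight color code else 0) := by
  unfold cmaStep cmaKeep cmaWeight
  rcases hc : code.toList with _ | ⟨c0, _ | ⟨c1, rest⟩⟩
  · simp
  · simp [hc] at h
  · by_cases hk : c1 = 'k' <;> by_cases hp : c1 = 'p' <;> by_cases hr : c1 = 'r' <;>
      by_cases hq : c1 = 'q' <;> by_cases hcol : [c0] = color <;>
      simp_all

-- Σ over a Nodup list of (if k = x then f k else 0) picks out f x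
lemma sum_ite_single (f : String → Int) (x : String) :
    ∀ s : List String, s.Nodup → x ∈ s →
      (s.map (fun k => if k = x then f k else 0)).sum = f x := by
  intro s
  induction s with
  | nil => simp
  | cons a s' ihs =>
    intro hs hx
    rcases List.mem_cons.mp hx with h | h
    · subst h
      have hz : (s'.map (fun k => if k = x then f k else 0)).sum = 0 := by
        apply List.sum_eq_zero
        intro y hy
        rcases List.mem_map.mp hy with ⟨k, hk, hky⟩
        have : k ≠ x := fun he => (List.nodup_cons.mp hs).1 (he ▸ hk)
        simp [this] at hky; omega
      simp [hz]
    · have hne : a ≠ x := fun he => (List.nodup_cons.mp hs).1 (he ▸ h)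
      simp [hne, ihs (List.Nodup.of_cons hs) h]

-- the weighted sum over any Nodup list covering l equals the plain sum over l
lemma sum_weight_count (f : String → Int) (s : List String) (hs : s.Nodup) :
    ∀ l : List String, (∀ x ∈ l, x ∈ s) →
      (s.map (fun k => f k * (l.count k : Int))).sum = (l.map f).sum := by
  intro l
  induction l with
  | nil => simp
  | cons x tl ih =>
    intro hcov
    have hx : x ∈ s := hcov x (by simp)
    have htl : ∀ y ∈ tl, y ∈ s := fun y hy => hcov y (by simp [hy])
    have hsplit : (s.map (fun k => f k * ((x :: tl).count k : Int))).sum =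
        (s.map (fun k => f k * (tl.count k : Int))).sum +
        (s.map (fun k => if k = x then f k else 0)).sum := by
      rw [← PySem.List.sum_map_add_int]
      apply congrArg List.sum
      apply List.map_congr_left
      intro k _
      by_cases hkx : k = x
      · simp [hkx]; ring
      · simp [hkx, Ne.symm hkx]
    rw [hsplit, sum_ite_single f x s hs hx, ih htl]
    simp [add_comm]

lemma cmaItem_eq (color : List Char) (total : Int) (k : String) (n : Int)
    (hk : cmaKeep k = true) :
    cmaItem color total (k, n) = total + cmaWeight color k * n := by
  unfold cmaItem cmaWeight
  unfold cmaKeep at hk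
  rcases hc : k.toList with _ | ⟨c0, _ | ⟨c1, rest⟩⟩ <;> simp [hc] at hk ⊢

theorem cma_spec_aux (board_matrix : List (List String)) (color : String)
    (hpre : Pre_count_material_advantage board_matrix color) :
    count_material_advantage board_matrix color =
      count_material_advantage_alt board_matrix color := by
  unfold Pre_count_material_advantage at hpre
  simp only [List.all_eq_true, bne_iff_ne, ne_eq] at hpre
  unfold count_material_advantage
  set cl := color.toList with hcl
  set pieces := (board_matrix.flatMap id).filter cmaKeep with hp
  have hpieces_flat : pieces = (board_matrix.flatten).filter cmaKeep := by
    simp [hp, List.flatMap_id]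
  -- B's port, with its counter loop recognised as Dict.counter (foldl_insert_getD_add_one_eq_counter)
  have halt : count_material_advantage_alt board_matrix color =
      (PySem.Dict.counter pieces).items.foldl (fun total p => cmaItem cl total p) 0 := by
    show (pieces.foldl (fun d code => d.insert code (d.getD code 0 + 1))
        PySem.Dict.empty).items.foldl (fun total p => cmaItem cl total p) 0 = _
    rw [PySem.Dict.foldl_insert_getD_add_one_eq_counter pieces]
  have hflat : board_matrix.foldl
      (fun advantage row => row.foldl (fun a code => cmaStep cl a code.toList) advantage) 0
      = (board_matrix.flatten).foldl (fun a code => cmaStep cl a code.toList) 0 :=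
    (List.foldl_flatten ..).symm
  have hmemflat : ∀ code ∈ board_matrix.flatten, code.toList.length ≠ 1 := by
    intro code hc
    rcases List.mem_flatten.mp hc with ⟨row, hrow, hcode⟩
    exact fun h => hpre row hrow code hcode h
  -- A's side: fold of steps = sum of weights over the filtered list
  have hA : ∀ (l : List String) (a : Int), (∀ c ∈ l, c.toList.length ≠ 1) →
      l.foldl (fun a code => cmaStep cl a code.toList) a =
        a + ((l.filter cmaKeep).map (cmaWeight cl)).sum := by
    intro l
    induction l with
    | nil => simp
    | cons x tl ih =>
      intro a hl
      have hx := hl x (by simp)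
      have htl : ∀ c ∈ tl, c.toList.length ≠ 1 := fun c hc => hl c (by simp [hc])
      simp only [List.foldl_cons, cmaStep_eq cl a x hx, ih _ htl]
      by_cases hk : cmaKeep x <;> simp [hk] <;> try ring
  -- B's side: the item loop adds cmaWeight * count for each distinct surviving code
  have hitems : ∀ p ∈ (PySem.Dict.counter pieces).items, cmaKeep p.1 = true := by
    intro p hpmem
    rw [PySem.Dict.items_counter] at hpmem
    rcases List.mem_map.mp hpmem with ⟨k, hk, hkp⟩
    have : k ∈ pieces := (PySem.Set.mem_ofList pieces k).mp hk
    have := List.of_mem_filter (hpieces_flat ▸ this)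
    subst hkp; exact this
  have hB : (PySem.Dict.counter pieces).items.foldl (fun total p => cmaItem cl total p) 0
      = 0 + ((PySem.Dict.counter pieces).items.map (fun p => cmaWeight cl p.1 * p.2)).sum := by
    rw [PySem.List.foldl_congr_mem _ _ (fun total p => total + cmaWeight cl p.1 * p.2) 0
      (fun acc p hpmem => cmaItem_eq cl acc p.1 p.2 (hitems p hpmem))]
    exact PySem.List.foldl_add _ _ 0
  rw [hflat, hA _ 0 hmemflat, halt, hB, PySem.Dict.items_counter, List.map_map]
  have heq : ((fun p : String × Int => cmaWeight cl p.1 * p.2) ∘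
      fun k => (k, (List.count k pieces : Int))) =
      fun k => cmaWeight cl k * (List.count k pieces : Int) := rfl
  rw [heq, sum_weight_count (cmaWeight cl) (PySem.Set.ofList pieces)
      (PySem.Set.nodup_ofList pieces) pieces
      (fun x hx => (PySem.Set.mem_ofList pieces x).mpr hx), hpieces_flat]

-- ===== VERDICT (by name: the statement is the Claim_ definition above) =====
theorem count_material_advantage_spec : Claim_equal_count_material_advantage := by
  intro bm color _ hpre
  unfold Spec_count_material_advantage
  exact cma_spec_aux bm color hpre
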